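-- pv_equiv track=rewrite | github.com/Ajoyabhi/python-dsa | Algo_Tutor Important Question/Tutorial Linked_list/unique_par.py | unique_pair
-- ===== SOURCE A (Python) =====
-- def unique_pair(arr):
--     unique_pairs = set()
--     n = len(arr)
--
--     for i in range(n):
--         for j in range(i + 1, n):
--             pair = tuple(sorted((arr[i], arr[j])))
--             unique_pairs.add(pair)
--
--     return unique_pairs, len(unique_pairs)
-- ===== SOURCE B (Python) =====
-- def unique_pair(arr):
--     done = set()   # values whose pair-row is already emitted
--     out = []       # unique pairs, in first-creation order
--     rest = list(arr)
--     while rest: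
--         x = rest.pop(0)
--         if x not in done:
--             rowseen = set()
--             for b in rest:
--                 if b not in done and b not in rowseen:
--                     out.append((x, b) if x <= b else (b, x))
--                 rowseen.add(b)
--             done.add(x)
--     return set(out), len(out)
-- ===== Notes on version B (the rewrite author's own statement) =====
-- stated objective: alternative
-- what changed: B emits each value's pair-row once at its first occurrence (skipping repeated values via a done-set and deduplicating row partners with a per-row seen-set, preserving first-insertion order), instead of inserting all n(n-1)/2 sorted pairs into one set.
import Mathlib
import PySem

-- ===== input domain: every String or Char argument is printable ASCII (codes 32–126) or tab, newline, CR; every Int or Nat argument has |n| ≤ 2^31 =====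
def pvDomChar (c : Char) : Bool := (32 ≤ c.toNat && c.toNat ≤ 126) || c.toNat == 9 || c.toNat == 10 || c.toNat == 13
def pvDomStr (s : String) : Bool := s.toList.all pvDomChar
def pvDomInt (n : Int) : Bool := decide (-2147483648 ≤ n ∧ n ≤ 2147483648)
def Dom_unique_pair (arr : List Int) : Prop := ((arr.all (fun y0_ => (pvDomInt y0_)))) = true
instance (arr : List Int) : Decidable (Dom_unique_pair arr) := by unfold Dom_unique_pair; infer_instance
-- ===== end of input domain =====

-- B changes the algorithm: one pair-row per distinct value (first occurrences only) instead of
-- inserting every sorted index-pair into a set.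

-- ===== PORT A =====
-- tuple(sorted((x, y))) for exactly two ints: exact
def pairA (x y : Int) : Int × Int := if x ≤ y then (x, y) else (y, x)

def unique_pair (arr : List Int) : (List (Int × Int)) × Int :=
  let n : Int := (arr.length : Int)
  let s :=
    (PySem.List.pyRange 0 n 1).foldl
      (fun s i =>
        (PySem.List.pyRange (i + 1) n 1).foldl
          (fun s j =>
            PySem.Set.add s (pairA (PySem.List.pyGetD arr i 0) (PySem.List.pyGetD arr j 0)))
          s)
      PySem.Set.empty
  (s, PySem.Set.len s)

-- ===== PORT B =====
-- the inner 'for b in rest' loop, state = (rowseen, out)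
def rowB (x : Int) (done : PySem.Set Int) (rest : List Int) (out : List (Int × Int)) :
    PySem.Set Int × List (Int × Int) :=
  rest.foldl
    (fun st b =>
      (PySem.Set.add st.1 b,
       if !(PySem.Set.contains done b) && !(PySem.Set.contains st.1 b) then st.2 ++ [if x ≤ b then (x, b) else (b, x)]
       else st.2))
    (PySem.Set.empty, out)

-- the 'while rest' loop (x = rest.pop(0))
def loopB : List Int → PySem.Set Int → List (Int × Int) → List (Int × Int)
  | [], _done, out => out
  | x :: rest, done, out =>
    if PySem.Set.contains done x then loopB rest done out
    else loopB rest (PySem.Set.add done x) (rowB x done rest out).2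

def unique_pair_alt (arr : List Int) : (List (Int × Int)) × Int :=
  let out := loopB arr PySem.Set.empty []
  (PySem.Set.ofList out, (out.length : Int))

-- ===== PRECONDITION & SPEC =====
def Spec_unique_pair (arr : List Int) (out : (List (Int × Int)) × Int) : Prop := out = unique_pair_alt arr
instance (arr : List Int) (out : (List (Int × Int)) × Int) : Decidable (Spec_unique_pair arr out) := by unfold Spec_unique_pair; infer_instance

-- ===== CLAIM (what is proved, stated in full; the proofs are below) =====
def Claim_equal_unique_pair : Prop := ∀ (arr : List Int), Dom_unique_pair arr → Spec_unique_pair arr (unique_pair arr)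

-- ===== LEMMAS AND PROOFS =====

-- proof-side canonical forms --------------------------------------------------

-- the list of sorted pairs A generates, one per index pair i < j, in A's order
def pvLA : List Int → List (Int × Int)
  | [] => []
  | x :: rest => rest.map (pairA x) ++ pvLA rest

-- dedup of pvLA, computed structurally
def pvS : List Int → List (Int × Int)
  | [] => []
  | x :: rest =>
    (PySem.Set.ofList rest).map (pairA x) ++
      (pvS rest).filter (fun p => !(p.1 == x) && !(p.2 == x))

-- the elements of l not in seen, first occurrences, in order
def pvNewFirsts : List Int → PySem.Set Int → List Int
  | [], _ => []
  | b :: t, seen =>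
    if PySem.Set.contains seen b then pvNewFirsts t seen
    else b :: pvNewFirsts t (PySem.Set.add seen b)

-- B's loop, output only, structurally
def pvT : List Int → PySem.Set Int → List (Int × Int)
  | [], _ => []
  | x :: rest, done =>
    if PySem.Set.contains done x then pvT rest done
    else
      ((pvNewFirsts rest PySem.Set.empty).filter (fun b => !(PySem.Set.contains done b))).map (fun b => if x ≤ b then (x, b) else (b, x)) ++
        pvT rest (PySem.Set.add done x)

-- A's fold, structurally
def pvFoldA : List Int → PySem.Set (Int × Int) → PySem.Set (Int × Int)
  | [], s => s
  | x :: rest, s => pvFoldA rest (PySem.Set.update s (rest.map (pairA x)))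

-- B side -----------------------------------------------------------------

theorem rowB_general (x : Int) (done : PySem.Set Int) :
    ∀ (rest : List Int) (seen : PySem.Set Int) (out : List (Int × Int)),
      (rest.foldl
        (fun st b =>
          (PySem.Set.add st.1 b,
           if !(PySem.Set.contains done b) && !(PySem.Set.contains st.1 b) then st.2 ++ [if x ≤ b then (x, b) else (b, x)]
           else st.2))
        (seen, out)).2 =
      out ++ ((pvNewFirsts rest seen).filter (fun b => !(PySem.Set.contains done b))).map (fun b => if x ≤ b then (x, b) else (b, x)) := by
  intro rest
  induction rest with
  | nil => intro seen out; simp [pvNewFirsts]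
  | cons b t ih =>
    intro seen out
    simp only [List.foldl_cons]
    by_cases hb : PySem.Set.contains seen b = true
    · have hmem : b ∈ seen := (PySem.Set.contains_iff seen b).mp hb
      rw [ih]
      simp [pvNewFirsts, hmem]
    · rw [ih]
      simp only [pvNewFirsts, hb, if_neg, Bool.not_eq_true]
      by_cases hd : PySem.Set.contains done b = true
      · have hm : b ∈ done := (PySem.Set.contains_iff done b).mp hd
        simp [hm]
      · have hm : b ∉ done := fun h => hd ((PySem.Set.contains_iff done b).mpr h)
        simp [hm, List.append_assoc]

theorem loopB_eq_pvT : ∀ (l : List Int) (done : PySem.Set Int) (out : List (Int × Int)),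
    loopB l done out = out ++ pvT l done := by
  intro l
  induction l with
  | nil => intro done out; simp [loopB, pvT]
  | cons x rest ih =>
    intro done out
    by_cases hx : PySem.Set.contains done x = true
    · have hm : x ∈ done := (PySem.Set.contains_iff done x).mp hx
      simp [loopB, pvT, hm, ih]
    · simp only [loopB, pvT, hx, if_neg, Bool.not_eq_true, rowB]
      rw [rowB_general, ih]
      simp [List.append_assoc]

theorem update_eq_append_newFirsts : ∀ (l : List Int) (seen : PySem.Set Int),
    PySem.Set.update seen l = seen ++ pvNewFirsts l seen := by
  intro l
  induction l with
  | nil => intro seen; simp [PySem.Set.update_nil, pvNewFirsts]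
  | cons b t ih =>
    intro seen
    rw [PySem.Set.update_cons]
    by_cases hb : PySem.Set.contains seen b = true
    · have hm : b ∈ seen := (PySem.Set.contains_iff seen b).mp hb
      rw [PySem.Set.add_of_mem hm, ih]
      simp [pvNewFirsts, hm]
    · rw [ih]
      have hm : b ∉ seen := fun h => hb ((PySem.Set.contains_iff seen b).mpr h)
      rw [PySem.Set.add_of_not_mem hm]
      simp [pvNewFirsts, hm]

theorem pvNewFirsts_empty (l : List Int) : pvNewFirsts l PySem.Set.empty = PySem.Set.ofList l := by
  have h := update_eq_append_newFirsts l PySem.Set.empty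
  simp only [PySem.Set.empty] at h ⊢
  rw [PySem.Set.update_nil_left] at h
  simpa using h.symm

theorem pvT_eq_filter : ∀ (l : List Int) (done : PySem.Set Int),
    pvT l done =
      (pvS l).filter (fun p => !(PySem.Set.contains done p.1) && !(PySem.Set.contains done p.2)) := by
  intro l
  induction l with
  | nil => intro done; simp [pvT, pvS]
  | cons x rest ih =>
    intro done
    have hca : ∀ (s : PySem.Set Int) (y a : Int),
        PySem.Set.contains (PySem.Set.add s y) a = (PySem.Set.contains s a || a == y) := by
      intro s y a
      rw [Bool.eq_iff_iff]
      simp [PySem.Set.mem_add]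
    simp only [pvT, pvS, List.filter_append, pvNewFirsts_empty]
    by_cases hx : PySem.Set.contains done x = true
    · have hmx : x ∈ done := (PySem.Set.contains_iff done x).mp hx
      have hrow : ∀ b : Int,
          (!(PySem.Set.contains done (pairA x b).1) && !(PySem.Set.contains done (pairA x b).2)) = false := by
        intro b; unfold pairA; by_cases hxb : x ≤ b <;> simp [hxb, hmx]
      rw [if_pos hx, List.filter_map]
      have h1 : (List.filter ((fun p => !(PySem.Set.contains done p.1) && !(PySem.Set.contains done p.2)) ∘ pairA x)
          (PySem.Set.ofList rest)) = [] := by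
        rw [List.filter_eq_nil_iff]
        intro b _
        rw [Function.comp_apply, hrow b]
        simp
      rw [h1, List.filter_filter]
      have h2 : (fun p : Int × Int =>
            (!(PySem.Set.contains done p.1) && !(PySem.Set.contains done p.2)) &&
              (!(p.1 == x) && !(p.2 == x))) =
          (fun p : Int × Int => !(PySem.Set.contains done p.1) && !(PySem.Set.contains done p.2)) := by
        funext p
        by_cases h1x : p.1 = x
        · simp [h1x, hmx]
        · by_cases h2x : p.2 = x
          · simp [h2x, hmx]
          · simp [h1x, h2x]
      rw [h2, ih]
      simp
    · have hmx : x ∉ done := fun h => hx ((PySem.Set.contains_iff done x).mpr h)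
      rw [if_neg hx, List.filter_map]
      have h1 : ((fun p => !(PySem.Set.contains done p.1) && !(PySem.Set.contains done p.2)) ∘ pairA x) =
          (fun b => !(PySem.Set.contains done b)) := by
        funext b
        simp only [Function.comp]
        unfold pairA
        by_cases hxb : x ≤ b <;> simp [hxb, hmx]
      rw [h1, List.filter_filter]
      have h2 : (fun p : Int × Int =>
            (!(PySem.Set.contains done p.1) && !(PySem.Set.contains done p.2)) &&
              (!(p.1 == x) && !(p.2 == x))) =
          (fun p : Int × Int =>
            !(PySem.Set.contains (PySem.Set.add done x) p.1) &&
              !(PySem.Set.contains (PySem.Set.add done x) p.2)) := by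
        funext p
        rw [hca, hca]
        cases hc1 : PySem.Set.contains done p.1 <;> cases hc2 : PySem.Set.contains done p.2 <;>
          cases hb1 : (p.1 == x) <;> cases hb2 : (p.2 == x) <;> rfl
      rw [h2, ih]
      rfl

theorem pvT_empty (l : List Int) : pvT l PySem.Set.empty = pvS l := by
  rw [pvT_eq_filter]
  apply List.filter_eq_self.mpr
  intro p _
  simp [PySem.Set.empty]

-- A side -----------------------------------------------------------------

theorem inner_conv (arr : List Int) (x : Int) :
    ∀ (l : List Int) (k : Nat), l = arr.drop k →
      ∀ (s : PySem.Set (Int × Int)),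
        (PySem.List.pyRange (k : Int) (arr.length : Int) 1).foldl
          (fun s j => PySem.Set.add s (pairA x (PySem.List.pyGetD arr j 0))) s =
        PySem.Set.update s (l.map (pairA x)) := by
  intro l
  induction l with
  | nil =>
    intro k hk s
    have hlen : arr.length ≤ k := by
      have h := congrArg List.length hk
      simp at h
      omega
    rw [PySem.List.pyRange_one_eq_nil (by exact_mod_cast hlen)]
    simp [PySem.Set.update_nil]
  | cons b t ih =>
    intro k hk s
    have hlen : k < arr.length := by
      have h := congrArg List.length hk
      simp at h
      omega
    have hb : arr[k]'hlen = b := by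
      have h0 : (arr.drop k)[0]'(by rw [← hk]; simp) = b := by simp [← hk]
      simpa using h0
    have ht : arr.drop (k + 1) = t := by
      have h2 : (arr.drop k).tail = arr.drop (k + 1) := by rw [List.tail_drop]
      rw [← h2, ← hk]
      rfl
    rw [PySem.List.pyRange_one_cons (by exact_mod_cast hlen)]
    simp only [List.foldl_cons]
    rw [PySem.List.pyGetD_natCast arr k 0, List.getD_eq_getElem _ _ hlen, hb]
    have h1 : ((k : Int) + 1) = (((k + 1 : Nat)) : Int) := by push_cast; ring
    rw [h1, ih (k + 1) ht.symm]
    rw [List.map_cons, PySem.Set.update_cons]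

theorem outer_conv (arr : List Int) :
    ∀ (l : List Int) (k : Nat), l = arr.drop k →
      ∀ (s : PySem.Set (Int × Int)),
        (PySem.List.pyRange (k : Int) (arr.length : Int) 1).foldl
          (fun s i =>
            (PySem.List.pyRange (i + 1) (arr.length : Int) 1).foldl
              (fun s j =>
                PySem.Set.add s (pairA (PySem.List.pyGetD arr i 0) (PySem.List.pyGetD arr j 0)))
              s)
          s = pvFoldA l s := by
  intro l
  induction l with
  | nil =>
    intro k hk s
    have hlen : arr.length ≤ k := by
      have h := congrArg List.length hk
      simp at h
      omega
    rw [PySem.List.pyRange_one_eq_nil (by exact_mod_cast hlen)]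
    simp [pvFoldA]
  | cons x t ih =>
    intro k hk s
    have hlen : k < arr.length := by
      have h := congrArg List.length hk
      simp at h
      omega
    have hx : arr[k]'hlen = x := by
      have h0 : (arr.drop k)[0]'(by rw [← hk]; simp) = x := by simp [← hk]
      simpa using h0
    have ht : arr.drop (k + 1) = t := by
      have : (arr.drop k).tail = arr.drop (k + 1) := by
        rw [List.tail_drop]
      rw [← this, ← hk]
      rfl
    rw [PySem.List.pyRange_one_cons (by exact_mod_cast hlen)]
    simp only [List.foldl_cons]
    have h1 : ((k : Int) + 1) = (((k + 1 : Nat)) : Int) := by push_cast; ring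
    rw [PySem.List.pyGetD_natCast arr k 0, List.getD_eq_getElem _ _ hlen, hx]
    rw [h1, inner_conv arr x t (k + 1) ht.symm s]
    rw [ih (k + 1) ht.symm]
    rfl

theorem pvFoldA_eq_update : ∀ (l : List Int) (s : PySem.Set (Int × Int)),
    pvFoldA l s = PySem.Set.update s (pvLA l) := by
  intro l
  induction l with
  | nil => intro s; simp [pvFoldA, pvLA, PySem.Set.update_nil]
  | cons x t ih =>
    intro s
    rw [pvFoldA, ih, pvLA, ← PySem.Set.update_append]

theorem pvS_mem : ∀ (l : List Int) (p : Int × Int), p ∈ pvS l → p.1 ∈ l ∧ p.2 ∈ l ∧ p.1 ≤ p.2 := by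
  intro l
  induction l with
  | nil => intro p hp; simp [pvS] at hp
  | cons x rest ih =>
    intro p hp
    rw [pvS, List.mem_append] at hp
    rcases hp with hp | hp
    · rcases List.mem_map.mp hp with ⟨b, hb, hpb⟩
      have hbr : b ∈ rest := (PySem.Set.mem_ofList _ _).mp hb
      subst hpb
      unfold pairA
      by_cases hxb : x ≤ b
      · simp [hxb, hbr]
      · simp [hxb, hbr]
        omega
    · have := ih p (List.mem_of_mem_filter hp)
      simp only [List.mem_cons]
      tauto

theorem ofList_map_inj {f : Int → Int × Int} (hf : Function.Injective f) :
    ∀ (l : List Int), PySem.Set.ofList (l.map f) = (PySem.Set.ofList l).map f := by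
  intro l
  induction l using List.reverseRecOn with
  | nil => simp [PySem.Set.ofList_nil]
  | append_singleton t b ih =>
    rw [List.map_append, List.map_singleton, PySem.Set.ofList_append_singleton,
      PySem.Set.ofList_append_singleton, ih]
    by_cases hb : b ∈ PySem.Set.ofList t
    · rw [PySem.Set.add_of_mem hb, PySem.Set.add_of_mem (List.mem_map_of_mem hb)]
    · rw [PySem.Set.add_of_not_mem hb, PySem.Set.add_of_not_mem (by
        intro h
        rcases List.mem_map.mp h with ⟨c, hc, hfc⟩
        exact hb (hf hfc ▸ hc)), List.map_append]
      rfl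

theorem pairA_inj (x : Int) : Function.Injective (pairA x) := by
  intro b1 b2 h
  unfold pairA at h
  by_cases h1 : x ≤ b1 <;> by_cases h2 : x ≤ b2 <;>
    simp_all [Prod.ext_iff]

theorem ofList_pvLA : ∀ (l : List Int), PySem.Set.ofList (pvLA l) = pvS l := by
  intro l
  induction l with
  | nil => simp [pvLA, pvS, PySem.Set.ofList_nil]
  | cons x rest ih =>
    rw [pvLA, pvS, PySem.Set.ofList_append, ofList_map_inj (pairA_inj x),
      PySem.Set.update_eq_append_filter, ih]
    congr 1
    apply List.filter_congr
    intro p hp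
    rcases pvS_mem rest p hp with ⟨h1, h2, h12⟩
    have hrow : p ∈ List.map (pairA x) (PySem.Set.ofList rest) ↔ (p.1 = x ∨ p.2 = x) := by
      constructor
      · intro hm
        rcases List.mem_map.mp hm with ⟨b, _, hpb⟩
        unfold pairA at hpb
        by_cases hxb : x ≤ b
        · rw [if_pos hxb] at hpb; left; rw [← hpb]
        · rw [if_neg hxb] at hpb; right; rw [← hpb]
      · intro hor
        apply List.mem_map.mpr
        rcases hor with h1x | h2x
        · refine ⟨p.2, (PySem.Set.mem_ofList _ _).mpr h2, ?_⟩
          unfold pairA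
          rw [if_pos (h1x ▸ h12)]
          exact Prod.ext h1x.symm rfl
        · by_cases hxle : x ≤ p.1
          · have hp1 : p.1 = x := le_antisymm (h2x ▸ h12) hxle
            refine ⟨p.2, (PySem.Set.mem_ofList _ _).mpr h2, ?_⟩
            unfold pairA
            rw [if_pos (hp1 ▸ h12)]
            exact Prod.ext hp1.symm rfl
          · refine ⟨p.1, (PySem.Set.mem_ofList _ _).mpr h1, ?_⟩
            unfold pairA
            rw [if_neg hxle]
            exact Prod.ext rfl h2x.symm
    cases hc : PySem.Set.contains (List.map (pairA x) (PySem.Set.ofList rest)) p with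
    | true =>
      have hor := hrow.mp ((PySem.Set.contains_iff _ _).mp hc)
      rcases hor with h | h <;> simp [h]
    | false =>
      have hnm : ¬(p.1 = x ∨ p.2 = x) := fun hor => by
        have ht := (PySem.Set.contains_iff _ _).mpr (hrow.mpr hor)
        rw [hc] at ht
        exact Bool.false_ne_true ht
      rw [not_or] at hnm
      simp [hnm.1, hnm.2]

theorem pvS_nodup : ∀ (l : List Int), (pvS l).Nodup := by
  intro l
  induction l with
  | nil => simp [pvS]
  | cons x rest ih =>
    rw [pvS]
    apply List.Nodup.append
    · exact (PySem.Set.nodup_ofList rest).map (pairA_inj x)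
    · exact ih.filter _
    · intro p hp hpf
      rcases List.mem_map.mp hp with ⟨b, _, hpb⟩
      have hx := List.of_mem_filter hpf
      simp only [Bool.and_eq_true, Bool.not_eq_true', beq_eq_false_iff_ne, ne_eq] at hx
      unfold pairA at hpb
      by_cases hxb : x ≤ b
      · rw [if_pos hxb] at hpb
        exact hx.1 (by rw [← hpb])
      · rw [if_neg hxb] at hpb
        exact hx.2 (by rw [← hpb])

-- ===== VERDICT (by name: the statement is the Claim_ definition above) =====
theorem unique_pair_spec : Claim_equal_unique_pair := by
  intro arr _hdom
  unfold Spec_unique_pair unique_pair unique_pair_alt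
  have hA : (PySem.List.pyRange 0 (arr.length : Int) 1).foldl
      (fun s i =>
        (PySem.List.pyRange (i + 1) (arr.length : Int) 1).foldl
          (fun s j =>
            PySem.Set.add s (pairA (PySem.List.pyGetD arr i 0) (PySem.List.pyGetD arr j 0)))
          s)
      PySem.Set.empty = pvS arr := by
    have h := outer_conv arr arr 0 (by simp) PySem.Set.empty
    simp only [Nat.cast_zero] at h
    rw [h, pvFoldA_eq_update]
    have : PySem.Set.update PySem.Set.empty (pvLA arr) = PySem.Set.ofList (pvLA arr) := by
      simp only [PySem.Set.empty]
      exact PySem.Set.update_nil_left _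
    rw [this, ofList_pvLA]
  have hB : loopB arr PySem.Set.empty [] = pvS arr := by
    rw [loopB_eq_pvT, pvT_empty]
    rfl
  simp only [hA, hB]
  rw [PySem.Set.ofList_eq_self_of_nodup (pvS arr) (pvS_nodup arr)]
  simp [PySem.Set.len]
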